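-- pv_equiv track=rewrite | github.com/CieraMarie/it-python | seven_counter.py | count_sevens
-- ===== SOURCE A (Python) =====
-- def count_sevens(text):
--     seven_count = 0
--     previous_digit = None
--     for digit in text:
--         if digit != "5" and previous_digit == "7":
--             seven_count += 1
--         previous_digit = digit
--     return seven_count
-- ===== SOURCE B (Python) =====
-- def count_sevens(text):
--     # Every '7' is followed by a non-'5', followed by '5', or is the last char:
--     # sevens-before-non-5 = (#'7') - (#"75" occurrences) - (1 if text ends in '7').
--     return text.count("7") - text.count("75") - (1 if text.endswith("7") else 0)
-- ===== Notes on version B (the rewrite author's own statement) =====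
-- stated objective: simpler
-- what changed: Replaces the stateful previous_digit scan with a closed-form inclusion-exclusion over three library substring queries: count('7') minus count('75') minus one if the text ends in '7'.
import Mathlib
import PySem

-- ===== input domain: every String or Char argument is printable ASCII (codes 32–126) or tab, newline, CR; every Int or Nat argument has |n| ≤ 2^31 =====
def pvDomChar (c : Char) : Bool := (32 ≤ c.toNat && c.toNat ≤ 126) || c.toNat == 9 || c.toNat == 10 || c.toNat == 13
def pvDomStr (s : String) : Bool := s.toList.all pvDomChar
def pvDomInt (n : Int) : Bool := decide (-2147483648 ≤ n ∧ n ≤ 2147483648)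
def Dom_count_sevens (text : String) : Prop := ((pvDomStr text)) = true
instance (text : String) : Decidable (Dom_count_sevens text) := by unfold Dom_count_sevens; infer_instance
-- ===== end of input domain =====

-- B replaces A's stateful previous_digit scan by inclusion-exclusion over library substring counts; simpler and structurally different, same O(n).


-- ===== PORT A =====
-- literal port: fold over the characters carrying (seven_count, previous_digit)
def count_sevens (text : String) : Int :=
  (text.toList.foldl
    (fun (st : Int × Option Char) (digit : Char) =>
      (if digit ≠ '5' ∧ st.2 = some '7' then st.1 + 1 else st.1, some digit))
    (0, none)).1

-- ===== PORT B =====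
-- literal port of Source B: text.count("7") - text.count("75") - (1 if text.endswith("7") else 0)
def count_sevens_alt (text : String) : Int :=
  (PySem.Str.count text "7" : Int) - (PySem.Str.count text "75" : Int) -
    (if PySem.Str.endswith text "7" then 1 else 0)

-- ===== PRECONDITION & SPEC =====
def Spec_count_sevens (text : String) (out : Int) : Prop := out = count_sevens_alt text
instance (text : String) (out : Int) : Decidable (Spec_count_sevens text out) := by unfold Spec_count_sevens; infer_instance

-- ===== CLAIM (what is proved, stated in full; the proofs are below) =====
def Claim_equal_count_sevens : Prop := ∀ (text : String), Dom_count_sevens text → Spec_count_sevens text (count_sevens text)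

-- ===== LEMMAS AND PROOFS =====

-- proof-only helper: the number of "75" occurrences counted the way str.count's scan meets them
def pairSkip : List Char → Nat
  | [] => 0
  | [_] => 0
  | a :: b :: t => if a = '7' ∧ b = '5' then pairSkip t + 1 else pairSkip (b :: t)

-- A's loop, characterised as a pairwise count over adjacent characters
theorem count_sevens_loop (l : List Char) (c : Int) (p : Char) :
    (l.foldl
      (fun (st : Int × Option Char) (digit : Char) =>
        (if digit ≠ '5' ∧ st.2 = some '7' then st.1 + 1 else st.1, some digit))
      (c, some p)).1
    = c + (((p :: l).zip l).countP (fun q => q.1 == '7' && q.2 != '5') : Nat) := by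
  induction l generalizing c p with
  | nil => simp
  | cons d t ih =>
    simp only [List.foldl_cons, List.zip_cons_cons, List.countP_cons, ih]
    have hb : ((p == '7' && d != '5') = true) ↔ (d ≠ '5' ∧ p = '7') := by
      simp [bne]; tauto
    cases hq : (p == '7' && d != '5') <;> simp_all <;> omega

theorem go_single (fuel : Nat) : ∀ (l : List Char) (acc : Nat), l.length ≤ fuel →
    PySem.Chars.count.go ['7'] fuel l acc = acc + l.count '7' := by
  induction fuel with
  | zero =>
    intro l acc h
    have : l = [] := List.eq_nil_of_length_eq_zero (Nat.le_zero.mp h)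
    subst this; simp [PySem.Chars.count.go]
  | succ n ih =>
    intro l acc h
    cases l with
    | nil => simp [PySem.Chars.count.go]
    | cons a t =>
      rw [PySem.Chars.count.go]
      simp at h
      have hp : List.isPrefixOf ['7'] (a :: t) = (a == '7') := by
        simp [List.isPrefixOf, eq_comm]
      rw [hp]
      by_cases ha : a = '7'
      · subst ha
        simp only [beq_self_eq_true, if_true]
        have hd : List.drop (['7'] : List Char).length ('7' :: t) = t := by simp
        rw [hd, ih t (acc + 1) (by omega)]
        simp [List.count_cons]; omega
      · simp only [beq_eq_false_iff_ne.mpr ha, Bool.false_eq_true, if_false]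
        rw [ih t acc (by omega)]
        simp [List.count_cons, ha]

theorem go_pair (fuel : Nat) : ∀ (l : List Char) (acc : Nat), l.length ≤ fuel →
    PySem.Chars.count.go ['7', '5'] fuel l acc = acc + pairSkip l := by
  induction fuel with
  | zero =>
    intro l acc h
    have : l = [] := List.eq_nil_of_length_eq_zero (Nat.le_zero.mp h)
    subst this; simp [PySem.Chars.count.go, pairSkip]
  | succ n ih =>
    intro l acc h
    cases l with
    | nil => simp [PySem.Chars.count.go, pairSkip]
    | cons a t =>
      rw [PySem.Chars.count.go]
      simp at h
      cases t with
      | nil =>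
        have hp : List.isPrefixOf ['7', '5'] [a] = false := by
          show (('7' == a) && false) = false
          simp
        simp only [hp, Bool.false_eq_true, if_false]
        rw [ih [] acc (by simp)]
        simp [pairSkip]
      | cons b t' =>
        have hp : List.isPrefixOf ['7', '5'] (a :: b :: t') = ('7' == a && '5' == b) := by
          show (('7' == a) && (('5' == b) && List.isPrefixOf [] t')) = _
          simp [List.isPrefixOf]
        rw [hp]
        simp at h
        by_cases hab : a = '7' ∧ b = '5'
        · obtain ⟨ha, hb⟩ := hab; subst ha; subst hb
          simp only [show (('7' : Char) == '7' && ('5' : Char) == '5') = true by decide, if_true]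
          have hd : List.drop (['7', '5'] : List Char).length ('7' :: '5' :: t') = t' := by simp
          rw [hd, ih t' (acc + 1) (by omega)]
          simp [pairSkip]; omega
        · have hf : ('7' == a && '5' == b) = false := by
            rcases not_and_or.mp hab with h1 | h1 <;> simp [Ne.symm h1]
          simp only [hf, Bool.false_eq_true, if_false]
          rw [ih (b :: t') acc (by simp; omega)]
          simp only [pairSkip, if_neg hab]

-- suffix bookkeeping
theorem suffix_cons2 (a b : Char) (t : List Char) :
    List.isSuffixOf ['7'] (a :: b :: t) = List.isSuffixOf ['7'] (b :: t) := by
  rw [Bool.eq_iff_iff, List.isSuffixOf_iff_suffix, List.isSuffixOf_iff_suffix,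
    List.suffix_cons_iff]
  constructor
  · rintro (h | h)
    · exact absurd (congrArg List.length h) (by simp)
    · exact h
  · exact Or.inr

theorem suffix_singleton (a : Char) : List.isSuffixOf ['7'] [a] = (a == '7') := by
  rw [Bool.eq_iff_iff, List.isSuffixOf_iff_suffix, beq_iff_eq]
  constructor
  · intro h
    rcases List.suffix_cons_iff.mp h with h | h
    · injection h with h1 _; exact h1.symm
    · simp at h
  · intro h; subst h; exact List.suffix_rfl

-- every '7' is followed by a non-'5', or by a '5', or is the last character
theorem seven_partition (n : Nat) : ∀ (l : List Char), l.length ≤ n →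
    l.count '7' = ((l.zip l.tail).countP (fun q => q.1 == '7' && q.2 != '5'))
      + pairSkip l + (if List.isSuffixOf ['7'] l then 1 else 0) := by
  induction n with
  | zero =>
    intro l h
    have : l = [] := List.eq_nil_of_length_eq_zero (Nat.le_zero.mp h)
    subst this; decide
  | succ n ih =>
    intro l h
    cases l with
    | nil => decide
    | cons a t =>
      cases t with
      | nil =>
        rw [suffix_singleton]
        by_cases ha : a = '7' <;> simp [pairSkip, ha]
      | cons b t' =>
        simp at h
        rw [suffix_cons2]
        rw [List.tail_cons, List.zip_cons_cons, List.countP_cons, List.count_cons]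
        by_cases hab : a = '7' ∧ b = '5'
        · obtain ⟨ha, hb⟩ := hab; subst ha; subst hb
          have h5 := ih ('5' :: t') (by simp; omega)
          have hps : pairSkip ('7' :: '5' :: t') = pairSkip ('5' :: t') + 1 := by
            have h2 : pairSkip ('5' :: t') = pairSkip t' := by
              cases t' with
              | nil => rfl
              | cons c u => simp [pairSkip]
            simp [pairSkip, h2]
          rw [hps]
          simp only [List.tail_cons] at h5
          simp only [show (('7' : Char) == '7' && ('5' : Char) != '5') = false by decide,
            Bool.false_eq_true, if_false]
          simp only [show (('7' : Char) == '7') = true by decide, if_true]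
          omega
        · have hbt := ih (b :: t') (by simp; omega)
          have hps : pairSkip (a :: b :: t') = pairSkip (b :: t') := by
            simp [pairSkip, if_neg hab]
          rw [hps]
          simp only [List.tail_cons] at hbt
          by_cases ha : a = '7'
          · subst ha
            have hb : b ≠ '5' := fun hb => hab ⟨rfl, hb⟩
            simp only [show (('7' : Char) == '7') = true by decide, Bool.true_and, if_true,
              show (b != '5') = true by simp [hb]]
            omega
          · simp only [show (a == '7') = false by simp [ha], Bool.false_and,
              Bool.false_eq_true, if_false]
            omega

-- ===== VERDICT (by name: the statement is the Claim_ definition above) =====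
theorem count_sevens_spec : Claim_equal_count_sevens := by
  intro text _
  unfold Spec_count_sevens count_sevens count_sevens_alt
  have h7 : ("7" : String).toList = ['7'] := by decide
  have h75 : ("75" : String).toList = ['7', '5'] := by decide
  simp only [PySem.Str.count_eq, PySem.Str.endswith_eq, h7, h75]
  have hc1 : PySem.Chars.count text.toList ['7'] = text.toList.count '7' := by
    show PySem.Chars.count.go ['7'] text.toList.length text.toList 0 = _
    rw [go_single text.toList.length text.toList 0 le_rfl]
    omega
  have hc2 : PySem.Chars.count text.toList ['7', '5'] = pairSkip text.toList := by
    show PySem.Chars.count.go ['7', '5'] text.toList.length text.toList 0 = _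
    rw [go_pair text.toList.length text.toList 0 le_rfl]
    omega
  have hend : PySem.Chars.endswith text.toList ['7'] = List.isSuffixOf ['7'] text.toList := rfl
  rw [hc1, hc2, hend]
  have hpart := seven_partition text.toList.length text.toList le_rfl
  cases hl : text.toList with
  | nil =>
    rw [hl] at hpart
    simp [pairSkip, show (['7'].isSuffixOf ([] : List Char)) = false by decide]
  | cons d t =>
    rw [hl] at hpart
    rw [List.foldl_cons]
    simp only [show (d ≠ '5' ∧ (none : Option Char) = some '7') ↔ False by simp, if_false]
    rw [count_sevens_loop t 0 d]
    simp only [List.tail_cons] at hpart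
    split_ifs at hpart ⊢ <;> omega
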